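-- pv_equiv track=rewrite | github.com/OhhMoo/SPEQTRO | src/speqtro/input/csv_peaks.py | _positional_map
-- ===== SOURCE A (Python) =====
-- def _positional_map(rows: list[list[str]]) -> dict:
--     """Guess column positions from data if no header exists."""
--     if not rows:
--         return {}
--     # Find first column that's consistently numeric (= shift)
--     n_cols = max(len(r) for r in rows[:10])
--     for i in range(n_cols):
--         vals = [r[i] for r in rows[:10] if i < len(r)]
--         if sum(_is_float(v.strip()) for v in vals) >= len(vals) * 0.8:
--             return {"shift": i}
--     return {}
--
-- def _is_float(s: str) -> bool:
--     try:
--         float(s)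
--         return True
--     except ValueError:
--         return False
-- ===== SOURCE B (Python) =====
-- def _positional_map(rows: list[list[str]]) -> dict:
--     """Guess column positions from data if no header exists."""
--     if not rows:
--         return {}
--     head = rows[:10]
--     n_cols = max(len(r) for r in head)
--     numeric = [0] * n_cols
--     total = [0] * n_cols
--     # single row-major pass maintaining per-column counters
--     for r in head:
--         for i, cell in enumerate(r):
--             total[i] += 1
--             if _is_float(cell.strip()):
--                 numeric[i] += 1
--     for i in range(n_cols):
--         # integer form of 'numeric >= total * 0.8' (exact for total <= 10)
--         if 10 * numeric[i] >= 8 * total[i]: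
--             return {"shift": i}
--     return {}
--
-- def _is_float(s: str) -> bool:
--     try:
--         float(s)
--         return True
--     except ValueError:
--         return False
-- ===== Notes on version B (the rewrite author's own statement) =====
-- stated objective: alternative
-- what changed: Replaces A's per-column rebuild of a vals list over rows[:10] with one row-major counting pass maintaining per-column numeric/total counters, then a separate decision pass using the exact integer form 10*numeric >= 8*total of the 0.8 threshold.
import Mathlib
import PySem

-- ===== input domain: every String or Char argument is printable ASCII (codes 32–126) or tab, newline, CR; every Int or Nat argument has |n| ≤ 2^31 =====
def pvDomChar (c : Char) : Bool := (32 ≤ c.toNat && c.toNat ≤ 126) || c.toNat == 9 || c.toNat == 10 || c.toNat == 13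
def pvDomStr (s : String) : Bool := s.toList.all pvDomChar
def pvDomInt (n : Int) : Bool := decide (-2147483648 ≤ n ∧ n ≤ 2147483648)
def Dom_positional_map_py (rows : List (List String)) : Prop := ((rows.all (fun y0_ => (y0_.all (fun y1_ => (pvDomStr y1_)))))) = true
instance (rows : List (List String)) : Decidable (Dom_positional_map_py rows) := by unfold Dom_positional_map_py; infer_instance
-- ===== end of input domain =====

-- B replaces A's per-column rebuild of a vals list with one row-major counting pass
-- (per-column numeric/total counters) plus a separate decision pass (alternative decomposition).

-- ===== PORT A =====
-- Shared helper (both Pythons use the same _is_float): the success test of Python's float(s).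
-- On the ASCII domain float(s) succeeds exactly for sign? (inf|infinity|nan case-insensitively,
-- or digits[.digits?]?|.digits followed by an optional exponent), underscores only between digits.

-- consume (digit | '_' digit)* and return the remainder
def pvDigitsTail : List Char → List Char
  | [] => []
  | c :: rest =>
    if c.isDigit then pvDigitsTail rest
    else if c == '_' then
      match rest with
      | d :: rest2 => if d.isDigit then pvDigitsTail rest2 else c :: rest
      | [] => [c]
    else c :: rest

-- consume digit (digit | '_' digit)*; none if no leading digit
def pvDigits : List Char → Option (List Char)
  | [] => none
  | c :: rest => if c.isDigit then some (pvDigitsTail rest) else none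

-- optional exponent part, then end of string
def pvExpEnd : List Char → Bool
  | [] => true
  | c :: rest =>
    if c == 'e' || c == 'E' then
      let rest2 := match rest with
        | d :: r => if d == '+' || d == '-' then r else d :: r
        | [] => []
      match pvDigits rest2 with
      | some [] => true
      | _ => false
    else false

-- _is_float s, i.e. "float(s) does not raise ValueError"
def pvIsFloat (s : String) : Bool :=
  let cs := s.toList
  let cs1 := match cs with
    | c :: rest => if c == '+' || c == '-' then rest else c :: rest
    | [] => []
  if cs1.map Char.toLower == "inf".toList || cs1.map Char.toLower == "infinity".toList
      || cs1.map Char.toLower == "nan".toList then true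
  else
    match pvDigits cs1 with
    | some afterInt =>
      let afterFrac := match afterInt with
        | '.' :: rest => (match pvDigits rest with | some t => t | none => rest)
        | other => other
      pvExpEnd afterFrac
    | none =>
      match cs1 with
      | '.' :: rest =>
        match pvDigits rest with
        | some t => pvExpEnd t
        | none => false
      | _ => false

-- sum(_is_float(v.strip()) for v in vals)
def pvCnt (vals : List String) : Nat :=
  vals.foldl (fun a v => a + (if pvIsFloat (PySem.Str.strip v) then 1 else 0)) 0

-- A's 'for i in range(n_cols)' loop with early return
def pvAFind (head : List (List String)) : List Nat → List (String × Int)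
  | [] => []
  | i :: rest =>
    let vals : List String := head.filterMap (fun r => r[i]?)   -- [r[i] for r in head if i < len(r)]
    -- 'sum(...) >= len(vals) * 0.8' in exact integer form (exact because len(vals) ≤ 10)
    if 8 * vals.length ≤ 10 * pvCnt vals then [("shift", (i : Int))] else pvAFind head rest

def positional_map_py (rows : List (List String)) : List (String × Int) :=
  if rows = [] then []                                           -- if not rows: return {}
  else
    let head := rows.take 10                                     -- rows[:10]
    let ncols : Nat := (head.map List.length).foldl Nat.max 0    -- max(len(r) for r in head), head ≠ []
    pvAFind head (List.range ncols)

-- ===== PORT B =====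
-- inner loop 'for i, cell in enumerate(r)': fold over r.zipIdx, pairs (cell, i)
def pvRowStep (st : List Nat × List Nat) (r : List String) : List Nat × List Nat :=
  r.zipIdx.foldl (fun st p =>
    let tot := st.2.set p.2 (st.2.getD p.2 0 + 1)
    let num := if pvIsFloat (PySem.Str.strip p.1) then st.1.set p.2 (st.1.getD p.2 0 + 1) else st.1
    (num, tot)) st

def positional_map_py_alt (rows : List (List String)) : List (String × Int) :=
  if rows = [] then []
  else
    let head := rows.take 10
    let ncols : Nat := (head.map List.length).foldl Nat.max 0
    let st := head.foldl pvRowStep (List.replicate ncols 0, List.replicate ncols 0)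
    -- decision pass: first i with 10*numeric[i] >= 8*total[i]
    match (List.range ncols).find? (fun i => decide (8 * st.2.getD i 0 ≤ 10 * st.1.getD i 0)) with
    | some i => [("shift", (i : Int))]
    | none => []

-- ===== PRECONDITION & SPEC =====
def Spec_positional_map_py (rows : List (List String)) (out : List (String × Int)) : Prop := out = positional_map_py_alt rows
instance (rows : List (List String)) (out : List (String × Int)) : Decidable (Spec_positional_map_py rows out) := by unfold Spec_positional_map_py; infer_instance

-- ===== CLAIM (what is proved, stated in full; the proofs are below) =====
def Claim_equal_positional_map_py : Prop := ∀ (rows : List (List String)), Dom_positional_map_py rows → Spec_positional_map_py rows (positional_map_py rows)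

-- ===== LEMMAS AND PROOFS =====

-- the body of B's inner fold, named for the proofs
def pvCellStep (st : List Nat × List Nat) (p : String × Nat) : List Nat × List Nat :=
  let tot := st.2.set p.2 (st.2.getD p.2 0 + 1)
  let num := if pvIsFloat (PySem.Str.strip p.1) then st.1.set p.2 (st.1.getD p.2 0 + 1) else st.1
  (num, tot)

theorem pvRowStep_eq (st : List Nat × List Nat) (r : List String) :
    pvRowStep st r = r.zipIdx.foldl pvCellStep st := rfl

theorem pv_getD_set (xs : List Nat) (i j v : Nat) (h : i < xs.length) :
    (xs.set i v).getD j 0 = if j = i then v else xs.getD j 0 := by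
  rw [List.getD_eq_getElem?_getD, List.getD_eq_getElem?_getD, List.getElem?_set]
  by_cases hij : j = i
  · subst hij; simp [h]
  · rw [if_neg (fun hh => hij hh.symm), if_neg hij]

theorem pv_cellStep_len (st : List Nat × List Nat) (p : String × Nat) :
    (pvCellStep st p).1.length = st.1.length ∧ (pvCellStep st p).2.length = st.2.length := by
  unfold pvCellStep; constructor
  · split <;> simp
  · simp

-- per-row effect of B's inner fold, pointwise at column j
theorem pv_inner (r : List String) (k : Nat) (st : List Nat × List Nat) (j : Nat)
    (h1 : k + r.length ≤ st.1.length) (h2 : k + r.length ≤ st.2.length) :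
    ((r.zipIdx k).foldl pvCellStep st).1.length = st.1.length ∧
    ((r.zipIdx k).foldl pvCellStep st).2.length = st.2.length ∧
    ((r.zipIdx k).foldl pvCellStep st).2.getD j 0 =
      st.2.getD j 0 + (if k ≤ j ∧ j < k + r.length then 1 else 0) ∧
    ((r.zipIdx k).foldl pvCellStep st).1.getD j 0 =
      st.1.getD j 0 + (if k ≤ j then
        (match r[j-k]? with | some c => if pvIsFloat (PySem.Str.strip c) then 1 else 0 | none => 0)
        else 0) := by
  induction r generalizing k st with
  | nil =>
    refine ⟨rfl, rfl, ?_, ?_⟩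
    · simp only [List.zipIdx_nil, List.foldl_nil, List.length_nil]
      rw [if_neg (by omega : ¬(k ≤ j ∧ j < k + 0))]; omega
    · simp only [List.zipIdx_nil, List.foldl_nil]
      split <;> simp
  | cons x xs ih =>
    have hlen := pv_cellStep_len st (x, k)
    have hk1 : k < st.1.length := by simp at h1; omega
    have hk2 : k < st.2.length := by simp at h2; omega
    have ih' := ih (k+1) (pvCellStep st (x, k)) (by simp at h1 ⊢; omega) (by simp at h2 ⊢; omega)
    simp only [List.zipIdx_cons, List.foldl_cons]
    have hstep2 : (pvCellStep st (x, k)).2.getD j 0 =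
        st.2.getD j 0 + (if j = k then 1 else 0) := by
      unfold pvCellStep
      simp only
      rw [pv_getD_set _ _ _ _ hk2]
      by_cases hjk : j = k
      · subst hjk; simp
      · simp [hjk]
    have hstep1 : (pvCellStep st (x, k)).1.getD j 0 =
        st.1.getD j 0 + (if j = k then (if pvIsFloat (PySem.Str.strip x) then 1 else 0) else 0) := by
      unfold pvCellStep
      simp only
      split
      · rw [pv_getD_set _ _ _ _ hk1]
        by_cases hjk : j = k
        · subst hjk; simp
        · simp [hjk]
      · by_cases hjk : j = k <;> simp_all
    refine ⟨by rw [ih'.1, hlen.1], by rw [ih'.2.1, hlen.2], ?_, ?_⟩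
    · rw [ih'.2.2.1, hstep2]
      by_cases hjk : j = k
      · subst hjk
        rw [if_neg (by omega : ¬(j + 1 ≤ j ∧ j < j + 1 + xs.length)),
            if_pos (⟨le_refl j, by simp only [List.length_cons]; omega⟩ : j ≤ j ∧ j < j + (x :: xs).length)]
        simp
      · rw [if_neg hjk]
        by_cases hle : k + 1 ≤ j
        · by_cases hlt : j < k + 1 + xs.length
          · rw [if_pos ⟨hle, hlt⟩,
                if_pos (⟨by omega, by simp only [List.length_cons]; omega⟩ : k ≤ j ∧ j < k + (x :: xs).length)]
          · rw [if_neg (by omega : ¬(k + 1 ≤ j ∧ j < k + 1 + xs.length)),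
                if_neg (by simp only [List.length_cons]; omega : ¬(k ≤ j ∧ j < k + (x :: xs).length))]
        · rw [if_neg (by omega : ¬(k + 1 ≤ j ∧ j < k + 1 + xs.length)),
              if_neg (by simp only [List.length_cons]; omega : ¬(k ≤ j ∧ j < k + (x :: xs).length))]
    · rw [ih'.2.2.2, hstep1]
      by_cases hjk : j = k
      · subst hjk
        rw [if_neg (by omega : ¬(j + 1 ≤ j)), if_pos (le_refl j), if_pos rfl, Nat.sub_self]
        simp
      · rw [if_neg hjk]
        by_cases hle : k + 1 ≤ j
        · rw [if_pos hle, if_pos (by omega : k ≤ j),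
              (by omega : j - k = (j - (k + 1)) + 1), List.getElem?_cons_succ]
          omega
        · rw [if_neg hle, if_neg (by omega : ¬ k ≤ j)]

theorem pvCnt_eq (vals : List String) :
    pvCnt vals = (vals.map (fun v => if pvIsFloat (PySem.Str.strip v) then 1 else 0)).sum := by
  unfold pvCnt
  rw [PySem.List.foldl_add_nat]
  simp

-- effect of B's whole counting pass at column j: total = #rows reaching j, numeric = A's count
theorem pv_outer (head : List (List String)) (st : List Nat × List Nat) (j : Nat)
    (h1 : ∀ r ∈ head, r.length ≤ st.1.length) (h2 : ∀ r ∈ head, r.length ≤ st.2.length) :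
    (head.foldl pvRowStep st).2.getD j 0 =
      st.2.getD j 0 + (head.filterMap (fun r => r[j]?)).length ∧
    (head.foldl pvRowStep st).1.getD j 0 =
      st.1.getD j 0 + pvCnt (head.filterMap (fun r => r[j]?)) := by
  induction head generalizing st with
  | nil => simp [pvCnt]
  | cons r hs ih =>
    have hr1 : r.length ≤ st.1.length := h1 r (by simp)
    have hr2 : r.length ≤ st.2.length := h2 r (by simp)
    have hinner := pv_inner r 0 st j (by omega) (by omega)
    rw [List.foldl_cons, pvRowStep_eq]
    have hlen1 : (r.zipIdx.foldl pvCellStep st).1.length = st.1.length := hinner.1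
    have hlen2 : (r.zipIdx.foldl pvCellStep st).2.length = st.2.length := hinner.2.1
    have ih' := ih (r.zipIdx.foldl pvCellStep st)
      (fun r' hr' => by rw [hlen1]; exact h1 r' (by simp [hr']))
      (fun r' hr' => by rw [hlen2]; exact h2 r' (by simp [hr']))
    constructor
    · rw [ih'.1, hinner.2.2.1]
      cases hrj : r[j]? with
      | some c =>
        have hj : j < r.length := by
          by_contra hc
          rw [List.getElem?_eq_none (by omega)] at hrj; simp at hrj
        simp only [List.filterMap_cons, hrj, List.length_cons]
        rw [if_pos (by omega : 0 ≤ j ∧ j < 0 + r.length)]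
        omega
      | none =>
        have hj : ¬ j < r.length := by
          intro hc; rw [List.getElem?_eq_getElem hc] at hrj; simp at hrj
        simp only [List.filterMap_cons, hrj]
        rw [if_neg (by omega : ¬(0 ≤ j ∧ j < 0 + r.length))]
        omega
    · rw [ih'.2, hinner.2.2.2]
      rw [if_pos (by omega : (0:Nat) ≤ j), Nat.sub_zero]
      cases hrj : r[j]? with
      | some c =>
        simp only [List.filterMap_cons, hrj, pvCnt_eq, List.map_cons, List.sum_cons]
        omega
      | none =>
        simp only [List.filterMap_cons, hrj]
        omega

-- A's early-return loop agrees with find? over the counters when the counters are right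
theorem pv_find (head : List (List String)) (num tot : List Nat) (L : List Nat)
    (h : ∀ i ∈ L, tot.getD i 0 = (head.filterMap (fun r => r[i]?)).length ∧
                  num.getD i 0 = pvCnt (head.filterMap (fun r => r[i]?))) :
    pvAFind head L =
      match L.find? (fun i => decide (8 * tot.getD i 0 ≤ 10 * num.getD i 0)) with
      | some i => [("shift", (i : Int))]
      | none => [] := by
  induction L with
  | nil => simp [pvAFind]
  | cons i rest ih =>
    have hi := h i (by simp)
    by_cases hc : 8 * tot.getD i 0 ≤ 10 * num.getD i 0
    · rw [List.find?_cons_of_pos (by simpa using hc)]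
      rw [hi.1, hi.2] at hc
      simp only [pvAFind]
      rw [if_pos hc]
    · rw [List.find?_cons_of_neg (by simpa using hc)]
      rw [hi.1, hi.2] at hc
      simp only [pvAFind]
      rw [if_neg hc]
      exact ih (fun i' hi' => h i' (by simp [hi']))

theorem pv_init_le (t : List Nat) (a : Nat) : a ≤ t.foldl Nat.max a := by
  induction t generalizing a with
  | nil => simp
  | cons c t ih => exact le_trans (Nat.le_max_left a c) (ih (Nat.max a c))

theorem pv_le_max (t : List Nat) (a : Nat) : ∀ y ∈ t, y ≤ t.foldl Nat.max a := by
  induction t generalizing a with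
  | nil => simp
  | cons b t ih =>
    intro y hy
    rcases List.mem_cons.1 hy with h | h
    · subst h
      exact le_trans (Nat.le_max_right a y) (pv_init_le t (Nat.max a y))
    · exact ih (Nat.max a b) y h

theorem pv_getD_replicate (n j : Nat) : (List.replicate n (0:Nat)).getD j 0 = 0 := by
  rw [List.getD_eq_getElem?_getD, List.getElem?_replicate]
  split <;> simp

-- ===== VERDICT (by name: the statement is the Claim_ definition above) =====
theorem positional_map_py_spec : Claim_equal_positional_map_py := by
  intro rows _dom
  unfold Spec_positional_map_py
  by_cases h0 : rows = []
  · simp [positional_map_py, positional_map_py_alt, h0]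
  · rw [positional_map_py, positional_map_py_alt, if_neg h0, if_neg h0]
    have hmax : ∀ r ∈ rows.take 10, r.length ≤ ((rows.take 10).map List.length).foldl Nat.max 0 :=
      fun r hr => pv_le_max _ 0 r.length (List.mem_map_of_mem hr)
    have hout := fun j => pv_outer (rows.take 10)
      (List.replicate (((rows.take 10).map List.length).foldl Nat.max 0) 0,
       List.replicate (((rows.take 10).map List.length).foldl Nat.max 0) 0) j
      (fun r hr => by simpa using hmax r hr) (fun r hr => by simpa using hmax r hr)
    exact pv_find _ _ _ _ (fun i _ => by
      refine ⟨?_, ?_⟩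
      · rw [(hout i).1, pv_getD_replicate]; omega
      · rw [(hout i).2, pv_getD_replicate]; omega)
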